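-- pv_equiv track=rewrite | github.com/sn00py666/theDecisionOfTheContestInSportsProgrammingSelection | task D.py | task_D
-- ===== SOURCE A (Python) =====
-- def task_D(arr, n):
--     # Массив для максимальной подпоследовательности слева
--     max_subseq_left = [0] * n
--     # Массив для минимальной подпоследовательности слева
--     min_subseq_left = [0] * n
--     # Массив для префиксных сумм справа (не используется в расчетах, но может быть полезен)
--     max_subseq_right = [0] * n
--     # Массив для минимальной подпоследовательности справа
--     min_subseq_right = [0] * n
--
--     # Инициализация для первой позиции
--     max_subseq_left[0] = arr[0]
--     min_subseq_left[0] = arr[0]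
--
--     # Вычисление максимальной и минимальной подпоследовательности слева
--     for i in range(1, n):
--         max_subseq_left[i] = max(arr[i], max_subseq_left[i - 1] + arr[i])
--         min_subseq_left[i] = min(arr[i], min_subseq_left[i - 1] + arr[i])
--
--     # Вычисление минимальной подпоследовательности справа
--     min_subseq_right[n - 1] = arr[n - 1]
--     max_subseq_right[n - 1] = arr[n - 1]
--     for i in range(n - 2, -1, -1):
--         max_subseq_right[i] = max(arr[i], max_subseq_right[i + 1] + arr[i])
--         min_subseq_right[i] = min(arr[i], min_subseq_right[i + 1] + arr[i])
--
--     res = 0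
--     for i in range(1,n):
--         res = max(max_subseq_left[i - 1] - min_subseq_right[i], max_subseq_right[i] - min_subseq_left[i - 1], res)
--
--     return res
-- ===== SOURCE B (Python) =====
-- def task_D(arr, n):
--     # Prefix-sum formulation instead of Kadane DP: with P[k] = arr[0]+...+arr[k-1],
--     # the max subarray ending at i-1 is P[i] - min(P[0..i-1]) and the min subarray
--     # starting at i is min(P[i+1..n]) - P[i]; each split term is pure arithmetic
--     # on prefix-sum extrema.
--     P = [0] * (n + 1)
--     for k in range(n):
--         P[k + 1] = P[k] + arr[k]
--
--     # suffix extrema of P: sufmin[k] = min(P[k..n]), sufmax[k] = max(P[k..n])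
--     sufmin = [0] * (n + 1)
--     sufmax = [0] * (n + 1)
--     sufmin[n] = P[n]
--     sufmax[n] = P[n]
--     for k in range(n - 1, 0, -1):
--         sufmin[k] = min(P[k], sufmin[k + 1])
--         sufmax[k] = max(P[k], sufmax[k + 1])
--
--     res = 0
--     lo = P[0]   # min of P[0..i-1]
--     hi = P[0]   # max of P[0..i-1]
--     for i in range(1, n):
--         res = max(res, 2 * P[i] - lo - sufmin[i + 1], sufmax[i + 1] + hi - 2 * P[i])
--         lo = min(lo, P[i])
--         hi = max(hi, P[i])
--     return res
-- ===== Notes on version B (the rewrite author's own statement) =====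
-- stated objective: alternative
-- what changed: Replaces the four forward/backward Kadane DP arrays with a prefix-sum formulation: anchored max/min subarrays become differences of prefix-sum extrema (max ending at i-1 = P[i]-min(P[0..i-1]), min starting at i = min(P[i+1..n])-P[i]), computed from one prefix-sum array, its suffix min/max, and two running scalars.
import Mathlib
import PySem

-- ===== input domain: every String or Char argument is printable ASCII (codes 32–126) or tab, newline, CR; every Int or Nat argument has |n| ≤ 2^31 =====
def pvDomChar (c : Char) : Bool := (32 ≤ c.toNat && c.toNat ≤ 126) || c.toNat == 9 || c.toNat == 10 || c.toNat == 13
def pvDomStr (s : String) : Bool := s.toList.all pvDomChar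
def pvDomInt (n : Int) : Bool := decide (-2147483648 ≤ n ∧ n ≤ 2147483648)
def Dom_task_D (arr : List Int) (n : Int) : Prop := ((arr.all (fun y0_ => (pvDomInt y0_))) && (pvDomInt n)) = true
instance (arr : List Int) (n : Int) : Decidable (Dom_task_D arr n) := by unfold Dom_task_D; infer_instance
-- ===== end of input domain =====

-- B replaces A's four forward/backward Kadane DP arrays by a prefix-sum formulation:
-- with P[k] = arr[0]+..+arr[k-1], each split term is arithmetic on prefix-sum extrema
-- (alternative algorithm, same O(n) time).
-- Under Pre_ every loop index is in range, so Python's range/indexing is ported over Nat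
-- (range ↦ List.range/range', list indexing ↦ getD; exact there).

-- ===== PORT A =====
def task_D (arr : List Int) (n : Int) : Int :=
  let N := n.toNat
  let g : Nat → Int := fun i => PySem.List.pyGetD arr (i : Int) 0
  -- max_subseq_left / min_subseq_left: [0]*n with position 0 initialised, then the forward loop
  let fwd := (List.range' 1 (N - 1)).foldl
    (fun (st : List Int × List Int) i =>
      (st.1.set i (max (g i) (st.1.getD (i - 1) 0 + g i)),
       st.2.set i (min (g i) (st.2.getD (i - 1) 0 + g i))))
    ((List.replicate N (0 : Int)).set 0 (g 0), (List.replicate N (0 : Int)).set 0 (g 0))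
  -- max_subseq_right / min_subseq_right: [0]*n with position n-1 initialised, then the backward loop
  let bwd := ((List.range' 0 (N - 1)).reverse).foldl
    (fun (st : List Int × List Int) i =>
      (st.1.set i (max (g i) (st.1.getD (i + 1) 0 + g i)),
       st.2.set i (min (g i) (st.2.getD (i + 1) 0 + g i))))
    ((List.replicate N (0 : Int)).set (N - 1) (g (N - 1)),
     (List.replicate N (0 : Int)).set (N - 1) (g (N - 1)))
  -- the combine loop
  (List.range' 1 (N - 1)).foldl
    (fun res i =>
      max (max (fwd.1.getD (i - 1) 0 - bwd.2.getD i 0)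
               (bwd.1.getD i 0 - fwd.2.getD (i - 1) 0)) res)
    0

-- ===== PORT B =====
def task_D_alt (arr : List Int) (n : Int) : Int :=
  let N := n.toNat
  let g : Nat → Int := fun i => PySem.List.pyGetD arr (i : Int) 0
  -- P = [0]*(n+1); for k in range(n): P[k+1] = P[k] + arr[k]
  let P := (List.range N).foldl
    (fun (l : List Int) k => l.set (k + 1) (l.getD k 0 + g k))
    (List.replicate (N + 1) (0 : Int))
  -- sufmin/sufmax = [0]*(n+1) with position n initialised, backward loop k = n-1, …, 1
  let suf := ((List.range' 1 (N - 1)).reverse).foldl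
    (fun (st : List Int × List Int) k =>
      (st.1.set k (min (P.getD k 0) (st.1.getD (k + 1) 0)),
       st.2.set k (max (P.getD k 0) (st.2.getD (k + 1) 0))))
    ((List.replicate (N + 1) (0 : Int)).set N (P.getD N 0),
     (List.replicate (N + 1) (0 : Int)).set N (P.getD N 0))
  -- forward combine loop: state (res, lo, hi) with lo/hi the running min/max of P[0..i-1]
  let st := (List.range' 1 (N - 1)).foldl
    (fun (st : Int × Int × Int) i =>
      (max (max st.1 (2 * P.getD i 0 - st.2.1 - suf.1.getD (i + 1) 0))
           (suf.2.getD (i + 1) 0 + st.2.2 - 2 * P.getD i 0),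
       min st.2.1 (P.getD i 0),
       max st.2.2 (P.getD i 0)))
    (0, P.getD 0 0, P.getD 0 0)
  st.1

-- ===== PRECONDITION & SPEC =====
-- A raises IndexError unless 1 ≤ n ≤ len(arr) (n ≤ 0 makes the [0]*n arrays empty so
-- the very first assignment fails; n > len(arr) over-indexes arr); exactly those inputs are excluded.
def Pre_task_D (arr : List Int) (n : Int) : Prop := 1 ≤ n ∧ n ≤ (arr.length : Int)
instance (arr : List Int) (n : Int) : Decidable (Pre_task_D arr n) := by unfold Pre_task_D; infer_instance
def pvWitness_task_D : List Int × Int := ([1, -2, 3], 3)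

def Spec_task_D (arr : List Int) (n : Int) (out : Int) : Prop := out = task_D_alt arr n
instance (arr : List Int) (n : Int) (out : Int) : Decidable (Spec_task_D arr n out) := by unfold Spec_task_D; infer_instance

-- ===== CLAIM (what is proved, stated in full; the proofs are below) =====
def Claim_equal_task_D : Prop := ∀ (arr : List Int) (n : Int), Dom_task_D arr n → Pre_task_D arr n → Spec_task_D arr n (task_D arr n)

-- ===== LEMMAS AND PROOFS =====

def gf (arr : List Int) : Nat → Int := fun i => PySem.List.pyGetD arr (i : Int) 0

-- ---- A-side helpers: the Kadane recurrences and A's three loops ----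
def fstep (g : Nat → Int) (st : List Int × List Int) (i : Nat) : List Int × List Int :=
  (st.1.set i (max (g i) (st.1.getD (i - 1) 0 + g i)),
   st.2.set i (min (g i) (st.2.getD (i - 1) 0 + g i)))

def finit (g : Nat → Int) (N : Nat) : List Int × List Int :=
  ((List.replicate N (0 : Int)).set 0 (g 0), (List.replicate N (0 : Int)).set 0 (g 0))

def fwdFold (g : Nat → Int) (N k : Nat) : List Int × List Int :=
  (List.range' 1 k).foldl (fstep g) (finit g N)

def bstep (g : Nat → Int) (st : List Int × List Int) (i : Nat) : List Int × List Int :=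
  (st.1.set i (max (g i) (st.1.getD (i + 1) 0 + g i)),
   st.2.set i (min (g i) (st.2.getD (i + 1) 0 + g i)))

def rinit (g : Nat → Int) (N : Nat) : List Int × List Int :=
  ((List.replicate N (0 : Int)).set (N - 1) (g (N - 1)),
   (List.replicate N (0 : Int)).set (N - 1) (g (N - 1)))

def bwdFold (g : Nat → Int) (m : Nat) (st : List Int × List Int) : List Int × List Int :=
  ((List.range' 0 m).reverse).foldl (bstep g) st

-- prefix (ending at k) and suffix (starting at k, with fuel m) Kadane values
def lmax (g : Nat → Int) : Nat → Int
  | 0 => g 0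
  | k + 1 => max (g (k + 1)) (lmax g k + g (k + 1))

def lmin (g : Nat → Int) : Nat → Int
  | 0 => g 0
  | k + 1 => min (g (k + 1)) (lmin g k + g (k + 1))

def rmax (g : Nat → Int) (k : Nat) : Nat → Int
  | 0 => g k
  | m + 1 => max (g k) (rmax g (k + 1) m + g k)

def rmin (g : Nat → Int) (k : Nat) : Nat → Int
  | 0 => g k
  | m + 1 => min (g k) (rmin g (k + 1) m + g k)

-- the combined per-split term
def tTerm (g : Nat → Int) (N i : Nat) : Int :=
  max (lmax g (i - 1) - rmin g i (N - 1 - i)) (rmax g i (N - 1 - i) - lmin g (i - 1))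

-- ---- B-side helpers: prefix sums and their extrema ----
def Pfun (g : Nat → Int) : Nat → Int
  | 0 => 0
  | k + 1 => Pfun g k + g k

def pmin (g : Nat → Int) : Nat → Int
  | 0 => Pfun g 0
  | k + 1 => min (pmin g k) (Pfun g (k + 1))

def pmax (g : Nat → Int) : Nat → Int
  | 0 => Pfun g 0
  | k + 1 => max (pmax g k) (Pfun g (k + 1))

-- Vmin g k m = min of Pfun over [k..k+m]; Wmax the max
def Vmin (g : Nat → Int) (k : Nat) : Nat → Int
  | 0 => Pfun g k
  | m + 1 => min (Pfun g k) (Vmin g (k + 1) m)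

def Wmax (g : Nat → Int) (k : Nat) : Nat → Int
  | 0 => Pfun g k
  | m + 1 => max (Pfun g k) (Wmax g (k + 1) m)

theorem getD_set_self {l : List Int} {i : Nat} {v : Int} (h : i < l.length) :
    (l.set i v).getD i 0 = v := by simp [List.getD, h]

theorem getD_set_ne {l : List Int} {i j : Nat} {v : Int} (h : i ≠ j) :
    (l.set i v).getD j 0 = l.getD j 0 := by simp [List.getD, List.getElem?_set_ne h]

-- the two ports written through the named helpers (pure re-foldings of the definitions)
theorem task_D_eq (arr : List Int) (n : Int) :
    task_D arr n =
      (List.range' 1 (n.toNat - 1)).foldl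
        (fun res i =>
          max (max ((fwdFold (gf arr) n.toNat (n.toNat - 1)).1.getD (i - 1) 0
                      - (bwdFold (gf arr) (n.toNat - 1) (rinit (gf arr) n.toNat)).2.getD i 0)
                   ((bwdFold (gf arr) (n.toNat - 1) (rinit (gf arr) n.toNat)).1.getD i 0
                      - (fwdFold (gf arr) n.toNat (n.toNat - 1)).2.getD (i - 1) 0)) res)
        0 := rfl

def pArr (g : Nat → Int) (N m : Nat) : List Int :=
  (List.range m).foldl (fun (l : List Int) k => l.set (k + 1) (l.getD k 0 + g k))
    (List.replicate (N + 1) (0 : Int))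

def sstep (P : List Int) (st : List Int × List Int) (k : Nat) : List Int × List Int :=
  (st.1.set k (min (P.getD k 0) (st.1.getD (k + 1) 0)),
   st.2.set k (max (P.getD k 0) (st.2.getD (k + 1) 0)))

def sinit (P : List Int) (N : Nat) : List Int × List Int :=
  ((List.replicate (N + 1) (0 : Int)).set N (P.getD N 0),
   (List.replicate (N + 1) (0 : Int)).set N (P.getD N 0))

def sufFold (P : List Int) (m : Nat) (st : List Int × List Int) : List Int × List Int :=
  ((List.range' 1 m).reverse).foldl (sstep P) st

theorem task_D_alt_eq (arr : List Int) (n : Int) :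
    task_D_alt arr n =
      ((List.range' 1 (n.toNat - 1)).foldl
        (fun (st : Int × Int × Int) i =>
          (max (max st.1 (2 * (pArr (gf arr) n.toNat n.toNat).getD i 0 - st.2.1
                  - (sufFold (pArr (gf arr) n.toNat n.toNat) (n.toNat - 1)
                      (sinit (pArr (gf arr) n.toNat n.toNat) n.toNat)).1.getD (i + 1) 0))
               ((sufFold (pArr (gf arr) n.toNat n.toNat) (n.toNat - 1)
                      (sinit (pArr (gf arr) n.toNat n.toNat) n.toNat)).2.getD (i + 1) 0
                  + st.2.2 - 2 * (pArr (gf arr) n.toNat n.toNat).getD i 0),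
           min st.2.1 ((pArr (gf arr) n.toNat n.toNat).getD i 0),
           max st.2.2 ((pArr (gf arr) n.toNat n.toNat).getD i 0)))
        (0, (pArr (gf arr) n.toNat n.toNat).getD 0 0, (pArr (gf arr) n.toNat n.toNat).getD 0 0)).1 := rfl

-- forward Kadane pass characterization (A)
theorem fwd_char (g : Nat → Int) (N : Nat) (hN : 1 ≤ N) (k : Nat) (hk : k ≤ N - 1) :
    (fwdFold g N k).1.length = N ∧ (fwdFold g N k).2.length = N ∧
    ∀ j ≤ k, (fwdFold g N k).1.getD j 0 = lmax g j ∧ (fwdFold g N k).2.getD j 0 = lmin g j := by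
  induction k with
  | zero =>
    refine ⟨by simp [fwdFold, finit], by simp [fwdFold, finit], ?_⟩
    intro j hj
    interval_cases j
    constructor <;>
      · simp only [fwdFold, List.range'_zero, List.foldl_nil, finit, lmax, lmin]
        exact getD_set_self (by simpa using hN)
  | succ k ih =>
    have hk' : k ≤ N - 1 := by omega
    obtain ⟨h1, h2, h3⟩ := ih hk'
    have hrange : List.range' 1 (k + 1) = List.range' 1 k ++ [1 + k] := List.range'_1_concat
    have hstep : fwdFold g N (k + 1) = fstep g (fwdFold g N k) (1 + k) := by
      simp [fwdFold, hrange, List.foldl_append]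
    have hlt : 1 + k < N := by omega
    refine ⟨by simp [hstep, fstep, h1], by simp [hstep, fstep, h2], ?_⟩
    intro j hj
    rcases Nat.lt_or_ge j (k + 1) with hj' | hj'
    · have hne : (1 + k) ≠ j := by omega
      have := h3 j (by omega)
      simp only [hstep, fstep]
      rw [getD_set_ne hne, getD_set_ne hne]
      exact this
    · have hjeq : j = k + 1 := by omega
      subst hjeq
      obtain ⟨e1, e2⟩ := h3 k (le_refl k)
      simp only [hstep, fstep]
      constructor
      · rw [show (1 + k) = k + 1 by omega] at hlt ⊢
        rw [getD_set_self (by simpa [h1])]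
        rw [show k + 1 - 1 = k by omega, e1]
        simp [lmax]
      · rw [show (1 + k) = k + 1 by omega] at hlt ⊢
        rw [getD_set_self (by simpa [h2])]
        rw [show k + 1 - 1 = k by omega, e2]
        simp [lmin]

-- backward Kadane pass characterization (A)
theorem bwd_char (g : Nat → Int) (N : Nat) (hN : 1 ≤ N) :
    ∀ (m : Nat), m ≤ N - 1 → ∀ (st : List Int × List Int),
      st.1.length = N → st.2.length = N →
      (∀ i, m ≤ i → i ≤ N - 1 → st.1.getD i 0 = rmax g i (N - 1 - i) ∧ st.2.getD i 0 = rmin g i (N - 1 - i)) →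
      ∀ i, i ≤ N - 1 →
        (bwdFold g m st).1.getD i 0 = rmax g i (N - 1 - i) ∧
        (bwdFold g m st).2.getD i 0 = rmin g i (N - 1 - i) := by
  intro m
  induction m with
  | zero =>
    intro _ st _ _ hinv i hi
    simpa [bwdFold] using hinv i (Nat.zero_le i) hi
  | succ m ih =>
    intro hm st hl1 hl2 hinv i hi
    have hrange : List.range' 0 (m + 1) = List.range' 0 m ++ [m] := by
      simpa using List.range'_1_concat (s := 0) (n := m)
    have hstep : bwdFold g (m + 1) st = bwdFold g m (bstep g st m) := by
      simp [bwdFold, hrange]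
    have hmN : m < N := by omega
    rw [hstep]
    refine ih (by omega) (bstep g st m) (by simp [bstep, hl1]) (by simp [bstep, hl2]) ?_ i hi
    intro j hj1 hj2
    rcases Nat.eq_or_lt_of_le hj1 with hje | hjl
    · subst hje
      have hsub : N - 1 - m = (N - 1 - (m + 1)) + 1 := by omega
      obtain ⟨e1, e2⟩ := hinv (m + 1) (by omega) (by omega)
      constructor
      · simp only [bstep]
        rw [getD_set_self (by simpa [hl1]), e1, hsub]
        simp [rmax]
      · simp only [bstep]
        rw [getD_set_self (by simpa [hl2]), e2, hsub]
        simp [rmin]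
    · have hne : m ≠ j := by omega
      obtain ⟨e1, e2⟩ := hinv j (by omega) hj2
      simp only [bstep]
      rw [getD_set_ne hne, getD_set_ne hne]
      exact ⟨e1, e2⟩

-- ---- bridging: Kadane values are differences of prefix-sum extrema ----
theorem lmax_eq (g : Nat → Int) (k : Nat) : lmax g k = Pfun g (k + 1) - pmin g k := by
  induction k with
  | zero => simp [lmax, Pfun, pmin]
  | succ k ih => simp only [lmax, ih, pmin, Pfun]; omega

theorem lmin_eq (g : Nat → Int) (k : Nat) : lmin g k = Pfun g (k + 1) - pmax g k := by
  induction k with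
  | zero => simp [lmin, Pfun, pmax]
  | succ k ih => simp only [lmin, ih, pmax, Pfun]; omega

theorem rmin_eq (g : Nat → Int) (m : Nat) : ∀ i, rmin g i m = Vmin g (i + 1) m - Pfun g i := by
  induction m with
  | zero => intro i; simp [rmin, Vmin, Pfun]
  | succ m ih =>
    intro i
    simp only [rmin, ih (i + 1), Vmin, Pfun]
    omega

theorem rmax_eq (g : Nat → Int) (m : Nat) : ∀ i, rmax g i m = Wmax g (i + 1) m - Pfun g i := by
  induction m with
  | zero => intro i; simp [rmax, Wmax, Pfun]
  | succ m ih =>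
    intro i
    simp only [rmax, ih (i + 1), Wmax, Pfun]
    omega

theorem tTerm_eq (g : Nat → Int) (N i : Nat) (hi : 1 ≤ i) :
    tTerm g N i =
      max (2 * Pfun g i - pmin g (i - 1) - Vmin g (i + 1) (N - 1 - i))
          (Wmax g (i + 1) (N - 1 - i) + pmax g (i - 1) - 2 * Pfun g i) := by
  unfold tTerm
  rw [lmax_eq, lmin_eq, rmin_eq, rmax_eq, show i - 1 + 1 = i by omega]
  omega

-- ---- characterization of B's arrays ----
theorem pArr_char (g : Nat → Int) (N : Nat) : ∀ m, m ≤ N →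
    (pArr g N m).length = N + 1 ∧ ∀ k ≤ m, (pArr g N m).getD k 0 = Pfun g k := by
  intro m
  induction m with
  | zero =>
    intro _
    refine ⟨by simp [pArr], ?_⟩
    intro k hk; interval_cases k
    simp [pArr, List.getD, Pfun]
  | succ m ih =>
    intro hm
    obtain ⟨h1, h2⟩ := ih (by omega)
    have hstep : pArr g N (m + 1) =
        (pArr g N m).set (m + 1) ((pArr g N m).getD m 0 + g m) := by
      simp [pArr, List.range_succ]
    refine ⟨by simp [hstep, h1], ?_⟩
    intro k hk
    rcases Nat.lt_or_ge k (m + 1) with hk' | hk'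
    · have hne : (m + 1) ≠ k := by omega
      rw [hstep, getD_set_ne hne]
      exact h2 k (by omega)
    · have hke : k = m + 1 := by omega
      subst hke
      rw [hstep, getD_set_self (by rw [h1]; omega), h2 m (le_refl m)]
      simp [Pfun]

theorem suf_char (P : List Int) (g : Nat → Int) (N : Nat) (hN : 1 ≤ N)
    (hP : ∀ k ≤ N, P.getD k 0 = Pfun g k) :
    ∀ (m : Nat), m ≤ N - 1 → ∀ (st : List Int × List Int),
      st.1.length = N + 1 → st.2.length = N + 1 →
      (∀ j, m < j → j ≤ N → st.1.getD j 0 = Vmin g j (N - j) ∧ st.2.getD j 0 = Wmax g j (N - j)) →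
      ∀ j, 1 ≤ j → j ≤ N →
        (sufFold P m st).1.getD j 0 = Vmin g j (N - j) ∧
        (sufFold P m st).2.getD j 0 = Wmax g j (N - j) := by
  intro m
  induction m with
  | zero =>
    intro _ st _ _ hinv j hj1 hj2
    simpa [sufFold] using hinv j (by omega) hj2
  | succ m ih =>
    intro hm st hl1 hl2 hinv j hj1 hj2
    have hrange : (List.range' 1 (m + 1)).reverse = (1 + m) :: (List.range' 1 m).reverse := by
      rw [List.range'_1_concat]; simp
    have hstep : sufFold P (m + 1) st = sufFold P m (sstep P st (1 + m)) := by
      simp [sufFold, hrange]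
    rw [hstep]
    refine ih (by omega) _ (by simp [sstep, hl1]) (by simp [sstep, hl2]) ?_ j hj1 hj2
    intro j' hj'1 hj'2
    rcases Nat.lt_or_ge (1 + m) j' with hlt | hge
    · have hne : (1 + m) ≠ j' := by omega
      simp only [sstep]
      rw [getD_set_ne hne, getD_set_ne hne]
      exact hinv j' (by omega) hj'2
    · have hje : j' = 1 + m := by omega
      subst hje
      obtain ⟨e1, e2⟩ := hinv (1 + m + 1) (by omega) (by omega)
      have hsub : N - (1 + m) = (N - (1 + m + 1)) + 1 := by omega
      constructor
      · simp only [sstep]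
        rw [getD_set_self (by rw [hl1]; omega), e1, hP (1 + m) (by omega), hsub]
        simp [Vmin]
      · simp only [sstep]
        rw [getD_set_self (by rw [hl2]; omega), e2, hP (1 + m) (by omega), hsub]
        simp [Wmax]

-- B's combine loop: running (res, lo, hi) computes the max-fold of the per-split term
theorem floop_char (g : Nat → Int) (N : Nat) :
    ∀ (k i : Nat) (res : Int), 1 ≤ i →
      ((List.range' i k).foldl
        (fun (st : Int × Int × Int) j =>
          (max (max st.1 (2 * Pfun g j - st.2.1 - Vmin g (j + 1) (N - 1 - j)))
               (Wmax g (j + 1) (N - 1 - j) + st.2.2 - 2 * Pfun g j),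
           min st.2.1 (Pfun g j),
           max st.2.2 (Pfun g j)))
        (res, pmin g (i - 1), pmax g (i - 1))).1
      = (List.range' i k).foldl (fun r j => max r (tTerm g N j)) res := by
  intro k
  induction k with
  | zero => intro i res _; simp
  | succ k ih =>
    intro i res hi
    rw [List.range'_succ, List.foldl_cons, List.foldl_cons]
    have hlo : min (pmin g (i - 1)) (Pfun g i) = pmin g (i + 1 - 1) := by
      rw [show i + 1 - 1 = i by omega, show i = i - 1 + 1 by omega]
      simp [pmin]
    have hhi : max (pmax g (i - 1)) (Pfun g i) = pmax g (i + 1 - 1) := by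
      rw [show i + 1 - 1 = i by omega, show i = i - 1 + 1 by omega]
      simp [pmax]
    have hres : max (max res (2 * Pfun g i - pmin g (i - 1) - Vmin g (i + 1) (N - 1 - i)))
          (Wmax g (i + 1) (N - 1 - i) + pmax g (i - 1) - 2 * Pfun g i)
        = max res (tTerm g N i) := by
      rw [tTerm_eq g N i hi, max_assoc]
    rw [hres, hlo, hhi]
    exact ih (i + 1) (max res (tTerm g N i)) (by omega)

-- ===== VERDICT (by name: the statement is the Claim_ definition above) =====
theorem task_D_spec : Claim_equal_task_D := by
  intro arr n hdom hpre
  unfold Spec_task_D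
  obtain ⟨hp1, _⟩ := hpre
  have hN : 1 ≤ n.toNat := by omega
  rw [task_D_eq, task_D_alt_eq]
  set g := gf arr with hgdef
  set N := n.toNat with hNdef
  obtain ⟨hl1, hl2, hfw⟩ := fwd_char g N hN (N - 1) (le_refl _)
  have hbw := bwd_char g N hN (N - 1) (le_refl _) (rinit g N)
    (by simp [rinit]) (by simp [rinit])
    (by
      intro i hi1 hi2
      have hie : i = N - 1 := by omega
      subst hie
      simp only [rinit, Nat.sub_self, rmax, rmin]
      constructor <;> exact getD_set_self (by simp; omega))
  have hA : (List.range' 1 (N - 1)).foldl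
        (fun res i =>
          max (max ((fwdFold g N (N - 1)).1.getD (i - 1) 0
                      - (bwdFold g (N - 1) (rinit g N)).2.getD i 0)
                   ((bwdFold g (N - 1) (rinit g N)).1.getD i 0
                      - (fwdFold g N (N - 1)).2.getD (i - 1) 0)) res)
        0
      = (List.range' 1 (N - 1)).foldl (fun r i => max r (tTerm g N i)) 0 := by
    apply PySem.List.foldl_congr_mem
    intro acc i hi
    rw [List.mem_range'_1] at hi
    rw [(hfw (i - 1) (by omega)).1, (hfw (i - 1) (by omega)).2,
      (hbw i (by omega)).1, (hbw i (by omega)).2]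
    rw [max_comm]
    rfl
  rw [hA]
  -- B side
  obtain ⟨hPlen, hPval⟩ := pArr_char g N N (le_refl N)
  have hsuf := suf_char (pArr g N N) g N hN (fun k hk => hPval k hk) (N - 1) (le_refl _)
    (sinit (pArr g N N) N)
    (by simp [sinit]) (by simp [sinit])
    (by
      intro j hj1 hj2
      have hje : j = N := by omega
      subst hje
      simp only [sinit, Nat.sub_self, Vmin, Wmax]
      rw [hPval N (le_refl N)]
      constructor <;> exact getD_set_self (by simp)
      )
  have hB : (List.range' 1 (N - 1)).foldl
        (fun (st : Int × Int × Int) i =>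
          (max (max st.1 (2 * (pArr g N N).getD i 0 - st.2.1
                  - (sufFold (pArr g N N) (N - 1) (sinit (pArr g N N) N)).1.getD (i + 1) 0))
               ((sufFold (pArr g N N) (N - 1) (sinit (pArr g N N) N)).2.getD (i + 1) 0
                  + st.2.2 - 2 * (pArr g N N).getD i 0),
           min st.2.1 ((pArr g N N).getD i 0),
           max st.2.2 ((pArr g N N).getD i 0)))
        (0, (pArr g N N).getD 0 0, (pArr g N N).getD 0 0)
      = (List.range' 1 (N - 1)).foldl
        (fun (st : Int × Int × Int) j =>
          (max (max st.1 (2 * Pfun g j - st.2.1 - Vmin g (j + 1) (N - 1 - j)))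
               (Wmax g (j + 1) (N - 1 - j) + st.2.2 - 2 * Pfun g j),
           min st.2.1 (Pfun g j),
           max st.2.2 (Pfun g j)))
        (0, pmin g 0, pmax g 0) := by
    rw [show ((0 : Int), (pArr g N N).getD 0 0, (pArr g N N).getD 0 0)
        = ((0 : Int), pmin g 0, pmax g 0) by
      rw [hPval 0 (by omega)]; simp [pmin, pmax, Pfun]]
    apply PySem.List.foldl_congr_mem
    intro acc i hi
    rw [List.mem_range'_1] at hi
    rw [hPval i (by omega),
      (hsuf (i + 1) (by omega) (by omega)).1, (hsuf (i + 1) (by omega) (by omega)).2,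
      show N - (i + 1) = N - 1 - i by omega]
  rw [hB, show ((0 : Int), pmin g 0, pmax g 0) = ((0:Int), pmin g (1 - 1), pmax g (1 - 1)) by norm_num,
    floop_char g N (N - 1) 1 0 (le_refl 1)]
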